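-- pv_equiv track=rewrite | github.com/kcsheraj/Codepath | Week2/Session 2/A1.py | is_authentic_collection
-- ===== SOURCE A (Python) =====
-- from collections import Counter
-- from collections import Counter
--
-- def is_authentic_collection(art_pieces):
--     if not art_pieces:
--         return False
--
--     n = max(art_pieces)
--
--     if len(art_pieces) != n + 1:
--         return False
--
--     counter = Counter(art_pieces)
--
--     # Check 1 to n-1 each occurs once
--     for i in range(1, n):
--         if counter[i] != 1:
--             return False
--
--     # Check n occurs exactly twice
--     if counter[n] != 2:
--         return False
--
--     return True
-- ===== SOURCE B (Python) =====
-- def is_authentic_collection(art_pieces):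
--     if not art_pieces:
--         return False
--     n = max(art_pieces)
--     if len(art_pieces) != n + 1:
--         return False
--     return sorted(art_pieces) == list(range(1, n)) + [n, n]
-- ===== Notes on version B (the rewrite author's own statement) =====
-- stated objective: simpler
-- what changed: Replaced the Counter build plus the range(1,n) per-value count loop and the separate count-of-n check with a single sort-and-compare against the canonical collection list(range(1,n)) + [n, n].
import Mathlib
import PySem

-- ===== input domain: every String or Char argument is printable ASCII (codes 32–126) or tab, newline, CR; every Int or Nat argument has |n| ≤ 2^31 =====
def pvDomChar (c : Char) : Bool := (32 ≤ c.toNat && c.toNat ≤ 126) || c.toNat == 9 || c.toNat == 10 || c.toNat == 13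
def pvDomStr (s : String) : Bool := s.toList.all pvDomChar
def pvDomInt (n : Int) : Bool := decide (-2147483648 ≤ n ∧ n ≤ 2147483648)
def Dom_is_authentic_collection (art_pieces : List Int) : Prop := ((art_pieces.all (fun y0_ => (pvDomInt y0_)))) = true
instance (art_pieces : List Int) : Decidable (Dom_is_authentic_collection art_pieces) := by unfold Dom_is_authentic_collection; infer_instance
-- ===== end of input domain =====

-- B replaces the Counter plus 1..n loop with a single sort-and-compare against the
-- canonical sorted collection range(1,n) + [n, n]; objective: simpler.

-- ===== PORT A =====
-- Literal port of A: empty guard, n = max, length guard, Counter, the range(1, n)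
-- loop (early return ⇒ `any`), then the count-of-n check.
def is_authentic_collection (art_pieces : List Int) : Bool :=
  if art_pieces = [] then false
  else
    match PySem.List.max? art_pieces (fun x => x) with
    | none => false
    | some n =>
      if (PySem.List.len art_pieces) ≠ n + 1 then false
      else
        let counter := PySem.Dict.counter art_pieces
        if (PySem.List.pyRange 1 n 1).any (fun i => !(counter.getD i 0 == 1)) then false
        else if counter.getD n 0 ≠ 2 then false
        else true

-- ===== PORT B =====
-- Literal port of B: same two guards, then sorted(art_pieces) == list(range(1, n)) + [n, n].
def is_authentic_collection_alt (art_pieces : List Int) : Bool :=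
  if art_pieces = [] then false
  else
    match PySem.List.max? art_pieces (fun x => x) with
    | none => false
    | some n =>
      if (PySem.List.len art_pieces) ≠ n + 1 then false
      else PySem.List.sorted art_pieces (fun x => x) false == PySem.List.pyRange 1 n 1 ++ [n, n]

-- ===== PRECONDITION & SPEC =====
def Spec_is_authentic_collection (art_pieces : List Int) (out : Bool) : Prop := out = is_authentic_collection_alt art_pieces
instance (art_pieces : List Int) (out : Bool) : Decidable (Spec_is_authentic_collection art_pieces out) := by unfold Spec_is_authentic_collection; infer_instance

-- ===== CLAIM (what is proved, stated in full; the proofs are below) =====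
def Claim_equal_is_authentic_collection : Prop := ∀ (art_pieces : List Int), Dom_is_authentic_collection art_pieces → Spec_is_authentic_collection art_pieces (is_authentic_collection art_pieces)

-- ===== LEMMAS AND PROOFS =====

lemma countP_cons_mem (r : Int) (R : List Int) (hr : r ∉ R) (xs : List Int) :
    xs.countP (fun x => decide (x ∈ r :: R)) = xs.count r + xs.countP (fun x => decide (x ∈ R)) := by
  induction xs with
  | nil => simp
  | cons x t ih =>
    by_cases hxr : x = r
    · subst hxr
      simp only [List.countP_cons, List.count_cons, ih]
      simp [hr]
      omega
    · by_cases hxR : x ∈ R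
      · simp only [List.countP_cons, List.count_cons, ih]
        simp [hxr, hxR]
        omega
      · simp only [List.countP_cons, List.count_cons, ih]
        simp [hxr, hxR]

lemma sum_count_eq_countP (R : List Int) (hR : R.Nodup) (xs : List Int) :
    (R.map (fun v => xs.count v)).sum = xs.countP (fun x => decide (x ∈ R)) := by
  induction R with
  | nil => simp
  | cons r R ih =>
    obtain ⟨hr, hR'⟩ := List.nodup_cons.mp hR
    simp only [List.map_cons, List.sum_cons, ih hR', countP_cons_mem r R hr xs]

lemma mem_bounds (xs : List Int) (n : Int)
    (hmax : PySem.List.max? xs (fun x => x) = some n)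
    (hlen : (xs.length : Int) = n + 1) (hn : 1 ≤ n)
    (H1 : ∀ i ∈ PySem.List.pyRange 1 n 1, xs.count i = 1)
    (H2 : xs.count n = 2) :
    ∀ x ∈ xs, 1 ≤ x ∧ x ≤ n := by
  have hub : ∀ x ∈ xs, x ≤ n := fun x hx => PySem.List.max?_isMax hmax x hx
  have hsplit : PySem.List.pyRange 1 (n + 1) 1 = PySem.List.pyRange 1 n 1 ++ [n] :=
    PySem.List.pyRange_one_succ_right hn
  have hmapsum : ((PySem.List.pyRange 1 n 1).map (fun v => xs.count v)).sum
      = (PySem.List.pyRange 1 n 1).length := by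
    have : (PySem.List.pyRange 1 n 1).map (fun v => xs.count v)
        = (PySem.List.pyRange 1 n 1).map (fun _ => 1) := List.map_congr_left H1
    simp [this]
  have hsum : ((PySem.List.pyRange 1 (n + 1) 1).map (fun v => xs.count v)).sum
      = (n - 1).toNat + 2 := by
    rw [hsplit]
    simp [hmapsum, PySem.List.length_pyRange_one, H2]
  have hcp : xs.countP (fun x => decide (x ∈ PySem.List.pyRange 1 (n + 1) 1)) = xs.length := by
    rw [← sum_count_eq_countP _ (PySem.List.nodup_pyRange_one 1 (n + 1)) xs, hsum]
    omega
  have hall := List.countP_eq_length.mp hcp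
  intro x hx
  have hmem : x ∈ PySem.List.pyRange 1 (n + 1) 1 := of_decide_eq_true (hall x hx)
  have := PySem.List.mem_pyRange_one.mp hmem
  exact ⟨this.1, by omega⟩

lemma key_iff (xs : List Int) (n : Int)
    (hmax : PySem.List.max? xs (fun x => x) = some n)
    (hlen : (xs.length : Int) = n + 1) :
    ((∀ i ∈ PySem.List.pyRange 1 n 1, xs.count i = 1) ∧ xs.count n = 2)
      ↔ PySem.List.sorted xs (fun x => x) false = PySem.List.pyRange 1 n 1 ++ [n, n] := by
  constructor
  · rintro ⟨H1, H2⟩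
    have hn : 1 ≤ n := by
      have := List.count_le_length (a := n) (l := xs)
      omega
    have hbounds := mem_bounds xs n hmax hlen hn H1 H2
    have hpair : List.Pairwise (fun a b : Int => a ≤ b)
        (PySem.List.pyRange 1 n 1 ++ [n, n]) := by
      rw [List.pairwise_append]
      refine ⟨(PySem.List.pairwise_lt_pyRange_one 1 n).imp le_of_lt, by simp, ?_⟩
      intro a ha b hb
      have := (PySem.List.mem_pyRange_one.mp ha).2
      have hb' : b = n := by simpa using hb
      omega
    have hperm : (PySem.List.pyRange 1 n 1 ++ [n, n]).Perm xs := by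
      rw [List.perm_iff_count]
      intro v
      rw [List.count_append]
      by_cases hv : v ∈ PySem.List.pyRange 1 n 1
      · have hv' := PySem.List.mem_pyRange_one.mp hv
        have hvn : n ≠ v := by omega
        rw [List.count_eq_one_of_mem (PySem.List.nodup_pyRange_one 1 n) hv, H1 v hv]
        simp [hvn]
      · by_cases hvn : v = n
        · subst hvn
          rw [List.count_eq_zero_of_not_mem hv, H2]
          simp
        · rw [List.count_eq_zero_of_not_mem hv]
          have hvx : v ∉ xs := by
            intro hvx
            have := hbounds v hvx
            exact hv (PySem.List.mem_pyRange_one.mpr ⟨this.1, lt_of_le_of_ne this.2 hvn⟩)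
          rw [List.count_eq_zero_of_not_mem hvx]
          simp [Ne.symm hvn]
    exact PySem.List.sorted_id_eq_of_perm_of_pairwise xs _ hperm hpair
  · intro h
    have hperm : (PySem.List.pyRange 1 n 1 ++ [n, n]).Perm xs := by
      rw [← h]; exact PySem.List.sorted_perm xs (fun x => x) false
    have hcount := List.perm_iff_count.mp hperm
    constructor
    · intro i hi
      have hi' := PySem.List.mem_pyRange_one.mp hi
      have hin : n ≠ i := by omega
      have := hcount i
      rw [List.count_append, List.count_eq_one_of_mem (PySem.List.nodup_pyRange_one 1 n) hi] at this
      simp [hin] at this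
      omega
    · have := hcount n
      have hnot : n ∉ PySem.List.pyRange 1 n 1 := by
        intro hmem
        have := PySem.List.mem_pyRange_one.mp hmem
        omega
      rw [List.count_append, List.count_eq_zero_of_not_mem hnot] at this
      simp at this
      omega

-- ===== VERDICT (by name: the statement is the Claim_ definition above) =====
theorem is_authentic_collection_spec : Claim_equal_is_authentic_collection := by
  intro xs _
  unfold Spec_is_authentic_collection is_authentic_collection is_authentic_collection_alt
  by_cases he : xs = []
  · rw [if_pos he, if_pos he]
  · rw [if_neg he, if_neg he]
    cases hm : PySem.List.max? xs (fun x => x) with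
    | none => rfl
    | some n =>
      dsimp only
      by_cases hl : PySem.List.len xs = n + 1
      · rw [if_neg (not_not_intro hl), if_neg (not_not_intro hl)]
        have hlen : (xs.length : Int) = n + 1 := by simpa [PySem.List.len] using hl
        have hk := key_iff xs n hm hlen
        simp only [PySem.Dict.getD_counter]
        by_cases hcond : (∀ i ∈ PySem.List.pyRange 1 n 1, xs.count i = 1) ∧ xs.count n = 2
        · have hs := hk.mp hcond
          have hany : ((PySem.List.pyRange 1 n 1).any
              fun i => !((List.count i xs : Int) == 1)) = false := by
            rw [List.any_eq_false]
            intro i hi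
            simp [hcond.1 i hi]
          rw [hany]
          simp [hcond.2, hs]
        · have hne : PySem.List.sorted xs (fun x => x) false ≠ PySem.List.pyRange 1 n 1 ++ [n, n] :=
            fun h => hcond (hk.mpr h)
          by_cases hc1 : ∀ i ∈ PySem.List.pyRange 1 n 1, xs.count i = 1
          · have hc2 : xs.count n ≠ 2 := fun h => hcond ⟨hc1, h⟩
            have hany : ((PySem.List.pyRange 1 n 1).any
                fun i => !((List.count i xs : Int) == 1)) = false := by
              rw [List.any_eq_false]
              intro i hi
              simp [hc1 i hi]
            have h2 : ((List.count n xs : Int) ≠ 2) := by exact_mod_cast hc2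
            rw [hany]
            simp [h2, hne]
          · have hc1' : ∃ i ∈ PySem.List.pyRange 1 n 1, xs.count i ≠ 1 := by
              by_contra hno
              exact hc1 (fun i hi => by
                by_contra hneq
                exact hno ⟨i, hi, hneq⟩)
            obtain ⟨i, hi, hci⟩ := hc1'
            have hany : ((PySem.List.pyRange 1 n 1).any
                fun i => !((List.count i xs : Int) == 1)) = true := by
              refine List.any_eq_true.mpr ⟨i, hi, ?_⟩
              simp
              exact_mod_cast hci
            rw [hany]
            simp [hne]
      · rw [if_pos hl, if_pos hl]
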